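-- pv_equiv track=rewrite | github.com/DanielMcCrystal/BioTune | source_code/Utils.py | chords_in_key
-- ===== SOURCE A (Python) =====
-- def get_triad(pitch, type):
-- 	triad = [pitch]
-- 	if type == 0: # major
-- 		triad.append(pitch + 4)
-- 		triad.append(pitch + 7)
-- 	elif type == 1: # minor
-- 		triad.append(pitch + 3)
-- 		triad.append(pitch + 7)
-- 	elif type == 2: # diminished
-- 		triad.append(pitch + 3)
-- 		triad.append(pitch + 6)
--
-- 	return triad
--
-- def chords_in_key(pitch, type):
--
-- 	if type == 0: # major
-- 		scale_pattern = 'wwhwww'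
-- 		type_pattern = [1, 1, 0, 0, 1, 2]
-- 	elif type == 1: # minor
-- 		scale_pattern = 'whwwhw'
-- 		type_pattern = [2, 0, 1, 1, 0, 0]
-- 	note = pitch
-- 	chords = [None] * 7
-- 	chords[0] = get_triad(pitch, type)
-- 	for i in range(len(scale_pattern)):
-- 		if scale_pattern[i] == 'w':
-- 			note += 2
-- 		elif scale_pattern[i] == 'h':
-- 			note += 1
-- 		chords[i + 1] = get_triad(note, type_pattern[i])
-- 	return chords
-- ===== SOURCE B (Python) =====
-- def chords_in_key(pitch, type):
--     if type == 0:  # major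
--         steps = [2, 2, 1, 2, 2, 2]
--     elif type == 1:  # minor
--         steps = [2, 1, 2, 2, 1, 2]
--     scale = [pitch]
--     for s in steps:
--         scale.append(scale[-1] + s)
--     scale += [p + 12 for p in scale[:4]]
--     return [[scale[i], scale[i + 2], scale[i + 4]] for i in range(7)]
-- ===== Notes on version B (the rewrite author's own statement) =====
-- stated objective: alternative
-- what changed: B builds the 7-note diatonic scale by cumulative-summing semitone steps and forms each triad by stacking thirds (scale[i], scale[i+2], scale[i+4] with +12 octave wrap), dropping the hardcoded per-degree triad-type table and the get_triad helper.
import Mathlib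
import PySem

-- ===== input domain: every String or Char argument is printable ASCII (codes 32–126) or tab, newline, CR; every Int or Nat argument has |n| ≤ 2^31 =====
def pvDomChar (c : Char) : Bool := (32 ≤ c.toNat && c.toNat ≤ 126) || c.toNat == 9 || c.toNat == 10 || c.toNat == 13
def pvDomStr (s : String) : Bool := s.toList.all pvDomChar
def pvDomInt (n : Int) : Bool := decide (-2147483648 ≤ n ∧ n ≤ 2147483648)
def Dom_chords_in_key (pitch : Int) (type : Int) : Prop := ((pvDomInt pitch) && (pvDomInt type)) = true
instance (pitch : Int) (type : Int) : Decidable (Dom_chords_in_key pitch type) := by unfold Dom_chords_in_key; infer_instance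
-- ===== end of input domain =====

-- B derives each triad by stacking thirds on the cumulative diatonic scale instead of
-- hardcoded per-degree triad types; objective: alternative (same O(1) cost, different derivation).

-- ===== PORT A =====
def get_triad (pitch : Int) (type : Int) : List Int :=
  if type = 0 then [pitch, pitch + 4, pitch + 7]
  else if type = 1 then [pitch, pitch + 3, pitch + 7]
  else if type = 2 then [pitch, pitch + 3, pitch + 6]
  else [pitch]

-- the for-loop over scale_pattern (indexed in step with type_pattern): note accumulates, a triad per step
def loopA (note : Int) (pat : List Char) (tps : List Int) : List (List Int) :=
  match pat, tps with
  | c :: pat', t :: tps' =>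
    let note' := if c = 'w' then note + 2 else if c = 'h' then note + 1 else note
    get_triad note' t :: loopA note' pat' tps'
  | _, _ => []

-- for type ∉ {0,1} the Python raises UnboundLocalError; Pre_ excludes that, the port returns []
def chords_in_key (pitch : Int) (type : Int) : List (List Int) :=
  if type = 0 then get_triad pitch type :: loopA pitch "wwhwww".toList [1, 1, 0, 0, 1, 2]
  else if type = 1 then get_triad pitch type :: loopA pitch "whwwhw".toList [2, 0, 1, 1, 0, 0]
  else []

-- ===== PORT B =====
-- scale.append(scale[-1] + s) for each step
def buildScale (scale : List Int) (steps : List Int) : List Int :=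
  match steps with
  | [] => scale
  | s :: rest => buildScale (scale ++ [scale.getLastD 0 + s]) rest

def stackThirds (pitch : Int) (steps : List Int) : List (List Int) :=
  let scale0 := buildScale [pitch] steps
  let scale := scale0 ++ (scale0.take 4).map (· + 12)
  (List.range 7).map (fun i => [scale.getD i 0, scale.getD (i + 2) 0, scale.getD (i + 4) 0])

-- for type ∉ {0,1} the Python raises UnboundLocalError; Pre_ excludes that, the port returns []
def chords_in_key_alt (pitch : Int) (type : Int) : List (List Int) :=
  if type = 0 then stackThirds pitch [2, 2, 1, 2, 2, 2]
  else if type = 1 then stackThirds pitch [2, 1, 2, 2, 1, 2]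
  else []

-- ===== PRECONDITION & SPEC =====
-- A raises UnboundLocalError (scale_pattern unassigned) for any type other than 0 or 1
def Pre_chords_in_key (pitch : Int) (type : Int) : Prop := type = 0 ∨ type = 1
instance (pitch : Int) (type : Int) : Decidable (Pre_chords_in_key pitch type) := by unfold Pre_chords_in_key; infer_instance
def pvWitness_chords_in_key : Int × Int := (60, 0)

def Spec_chords_in_key (pitch : Int) (type : Int) (out : List (List Int)) : Prop := out = chords_in_key_alt pitch type
instance (pitch : Int) (type : Int) (out : List (List Int)) : Decidable (Spec_chords_in_key pitch type out) := by unfold Spec_chords_in_key; infer_instance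

-- ===== CLAIM (what is proved, stated in full; the proofs are below) =====
def Claim_equal_chords_in_key : Prop := ∀ (pitch : Int) (type : Int), Dom_chords_in_key pitch type → Pre_chords_in_key pitch type → Spec_chords_in_key pitch type (chords_in_key pitch type)

-- ===== LEMMAS AND PROOFS =====

-- ===== VERDICT (by name: the statement is the Claim_ definition above) =====
theorem chords_in_key_spec : Claim_equal_chords_in_key := by
  intro pitch type _ hpre
  unfold Spec_chords_in_key
  rcases hpre with h | h <;> subst h <;>
    simp [chords_in_key, chords_in_key_alt, stackThirds, buildScale, loopA, get_triad,
      List.range_succ] <;> omega
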